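-- pv_equiv track=rewrite | github.com/casted0/snake_path | modules/calculate_movements.py | procces_map
-- ===== SOURCE A (Python) =====
-- def procces_map(board_size, snake):
--     map = []
--     for row in range(board_size[0]):
--         for column in range(board_size[1]):
--             map.append([row, column])
--
--     for cell in snake:
--         if cell in map:
--             map.remove(cell)
--
--     map.append(snake[len(snake)-1])
--
--     return map
-- ===== SOURCE B (Python) =====
-- def procces_map(board_size, snake):
--     h = board_size[0]
--     w = board_size[1] if h > 0 else 0
--     total = h * w if h > 0 and w > 0 else 0
--     blocked = sorted({cell[0] * w + cell[1] for cell in snake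
--                       if len(cell) == 2 and 0 <= cell[0] < h and 0 <= cell[1] < w})
--     out = []
--     prev = 0
--     for b in blocked:
--         for i in range(prev, b):
--             out.append([i // w, i % w])
--         prev = b + 1
--     for i in range(prev, total):
--         out.append([i // w, i % w])
--     out.append(snake[len(snake) - 1])
--     return out
-- ===== Notes on version B (the rewrite author's own statement) =====
-- stated objective: alternative
-- what changed: Linearizes the grid to row-major indices 0..h*w-1, collects the in-range snake cells as a sorted set of blocked indices, and emits the free cells as the gaps between consecutive blocked indices (reconstructing [row, col] by divmod), instead of materializing the full grid and removing snake cells by repeated list scans.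
import Mathlib
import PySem

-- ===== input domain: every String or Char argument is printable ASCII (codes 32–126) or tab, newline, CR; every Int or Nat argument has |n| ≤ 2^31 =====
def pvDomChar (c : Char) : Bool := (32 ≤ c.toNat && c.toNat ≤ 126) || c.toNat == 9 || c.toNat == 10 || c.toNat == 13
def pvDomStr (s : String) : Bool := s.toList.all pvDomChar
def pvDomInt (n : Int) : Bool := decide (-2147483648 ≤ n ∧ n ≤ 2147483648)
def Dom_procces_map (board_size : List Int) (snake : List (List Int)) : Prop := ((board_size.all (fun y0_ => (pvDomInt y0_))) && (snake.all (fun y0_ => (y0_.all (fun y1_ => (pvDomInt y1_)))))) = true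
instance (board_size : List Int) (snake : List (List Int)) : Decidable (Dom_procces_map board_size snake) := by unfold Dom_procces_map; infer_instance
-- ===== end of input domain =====

-- B linearizes the grid to row-major indices, sorts the set of blocked (in-range snake) indices and
-- emits the free cells as the gaps between them, instead of materializing the grid and removing
-- snake cells by repeated list scans (objective: alternative; equivalence of the RETURN value).

-- ===== PORT A =====
def procces_map (board_size : List Int) (snake : List (List Int)) : List (List Int) :=
  -- board_size[0] / board_size[1]: IndexError (pyGet? = none) is excluded by Pre_; board_size[1]
  -- is only reached by Python when board_size[0] > 0, which Pre_ mirrors, so getD 0 is harmless.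
  let h : Int := (PySem.List.pyGet? board_size 0).getD 0
  let w : Int := (PySem.List.pyGet? board_size 1).getD 0
  let map0 : List (List Int) :=
    (PySem.List.pyRange 0 h 1).foldl (fun m row =>
      (PySem.List.pyRange 0 w 1).foldl (fun m column => m ++ [[row, column]]) m) []
  let map1 : List (List Int) :=
    snake.foldl (fun m cell => if cell ∈ m then (PySem.List.remove? m cell).getD m else m) map0
  map1 ++ [(PySem.List.pyGet? snake ((snake.length : Int) - 1)).getD []]

-- ===== PORT B =====
-- Python's set comprehension of ints is PySem.Set.ofList of the comprehension's list; sorted()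
-- then determines the order by the (distinct) values, exactly as in Python.  'cell[0]'/'cell[1]'
-- after the len(cell)==2 guard is the [r, c] pattern; i // w and i % w with w > 0 are exact.
def procces_map_alt (board_size : List Int) (snake : List (List Int)) : List (List Int) :=
  let h : Int := (PySem.List.pyGet? board_size 0).getD 0
  let w : Int := if 0 < h then (PySem.List.pyGet? board_size 1).getD 0 else 0
  let total : Int := if 0 < h ∧ 0 < w then h * w else 0
  let blocked : List Int :=
    PySem.List.sorted (PySem.Set.ofList (snake.filterMap (fun cell =>
      match cell with
      | [r, c] => if 0 ≤ r ∧ r < h ∧ 0 ≤ c ∧ c < w then some (r * w + c) else none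
      | _ => none))) (fun i => i)
  let st : Int × List (List Int) :=
    blocked.foldl (fun st b =>
      (b + 1, st.2 ++ (PySem.List.pyRange st.1 b 1).map
        (fun i => [PySem.Int.floordiv i w, PySem.Int.mod i w]))) (0, [])
  (st.2 ++ (PySem.List.pyRange st.1 total 1).map
      (fun i => [PySem.Int.floordiv i w, PySem.Int.mod i w]))
    ++ [(PySem.List.pyGet? snake ((snake.length : Int) - 1)).getD []]

-- ===== PRECONDITION & SPEC =====
-- Pre_ excludes exactly the inputs on which Python A raises: empty snake (IndexError at
-- snake[len(snake)-1]) and board_size too short for the indexing A actually performs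
-- (board_size[0] always; board_size[1] only when board_size[0] > 0).
def Pre_procces_map (board_size : List Int) (snake : List (List Int)) : Prop :=
  snake ≠ [] ∧ (2 ≤ board_size.length ∨ (board_size.length = 1 ∧ board_size.headI ≤ 0))
instance (board_size : List Int) (snake : List (List Int)) : Decidable (Pre_procces_map board_size snake) := by unfold Pre_procces_map; infer_instance
def pvWitness_procces_map : List Int × List (List Int) := ([2, 2], [[0, 0], [0, 1]])

def Spec_procces_map (board_size : List Int) (snake : List (List Int)) (out : List (List Int)) : Prop := out = procces_map_alt board_size snake
instance (board_size : List Int) (snake : List (List Int)) (out : List (List Int)) : Decidable (Spec_procces_map board_size snake out) := by unfold Spec_procces_map; infer_instance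

-- ===== CLAIM (what is proved, stated in full; the proofs are below) =====
def Claim_equal_procces_map : Prop := ∀ (board_size : List Int) (snake : List (List Int)), Dom_procces_map board_size snake → Pre_procces_map board_size snake → Spec_procces_map board_size snake (procces_map board_size snake)

-- ===== LEMMAS AND PROOFS =====

-- the grid in row-major order (A's first double loop)
def pvGrid (h w : Int) : List (List Int) :=
  (PySem.List.pyRange 0 h 1).flatMap (fun row =>
    (PySem.List.pyRange 0 w 1).map (fun column => [row, column]))

-- B's index-to-cell decoder
def pvCell (w i : Int) : List Int := [PySem.Int.floordiv i w, PySem.Int.mod i w]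

-- B's blocked-index comprehension (before set/sort)
def pvBlk (h w : Int) (snake : List (List Int)) : List Int :=
  snake.filterMap (fun cell =>
    match cell with
    | [r, c] => if 0 ≤ r ∧ r < h ∧ 0 ≤ c ∧ c < w then some (r * w + c) else none
    | _ => none)

theorem pvGrid_pairwise (h w : Int) : (pvGrid h w).Pairwise (· < ·) := by
  unfold pvGrid
  rw [List.pairwise_flatMap]
  refine ⟨fun r _ => ?_, ?_⟩
  · rw [List.pairwise_map]
    exact (PySem.List.pairwise_lt_pyRange_one 0 w).imp (fun hcc' => by
      rw [List.cons_lt_cons_iff]; exact Or.inr ⟨rfl, by rw [List.cons_lt_cons_iff]; exact Or.inl hcc'⟩)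
  · refine (PySem.List.pairwise_lt_pyRange_one 0 h).imp ?_
    intro r r' hrr' x hx y hy
    obtain ⟨c, _, rfl⟩ := List.mem_map.mp hx
    obtain ⟨c', _, rfl⟩ := List.mem_map.mp hy
    rw [List.cons_lt_cons_iff]; exact Or.inl hrr'

theorem pvGrid_nodup (h w : Int) : (pvGrid h w).Nodup :=
  (pvGrid_pairwise h w).imp (fun hlt => ne_of_lt hlt)

-- A's removal loop on a duplicate-free list keeps exactly the cells not in `cells`
theorem pvFoldlRemove_eq_filter (cells : List (List Int)) (m : List (List Int)) (hm : m.Nodup) :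
    cells.foldl (fun m cell => if cell ∈ m then (PySem.List.remove? m cell).getD m else m) m
      = m.filter (fun x => !decide (x ∈ cells)) := by
  induction cells generalizing m with
  | nil => simp
  | cons c cs ih =>
    rw [List.foldl_cons]
    have hstep : (if c ∈ m then (PySem.List.remove? m c).getD m else m)
        = m.filter (fun x => !decide (x = c)) := by
      by_cases hc : c ∈ m
      · rw [if_pos hc, PySem.List.remove?_eq_some_erase m c hc, Option.getD_some,
          hm.erase_eq_filter c]
        apply List.filter_congr
        intro x _
        by_cases hxc : x = c <;> simp [hxc]
      · rw [if_neg hc, Eq.comm]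
        apply List.filter_eq_self.mpr
        intro x hx
        simp only [Bool.not_eq_eq_eq_not, Bool.not_true, decide_eq_false_iff_not]
        rintro rfl; exact hc hx
    rw [hstep, ih _ (hm.filter _), List.filter_filter]
    apply List.filter_congr
    intro x _
    by_cases h1 : x = c <;> by_cases h2 : x ∈ cs <;> simp [h1, h2]

-- row-major division/remainder uniqueness
theorem pvFdm (w r c : Int) (hw : 0 < w) (h0 : 0 ≤ c) (h1 : c < w) :
    PySem.Int.floordiv (r * w + c) w = r ∧ PySem.Int.mod (r * w + c) w = c := by
  have hd : PySem.Int.floordiv (r * w + c) w = r :=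
    (PySem.Int.floordiv_eq_iff_of_pos hw).mpr ⟨by nlinarith, by nlinarith⟩
  refine ⟨hd, ?_⟩
  have := PySem.Int.floordiv_mul_add_mod (r * w + c) w
  rw [hd] at this; linarith

-- the grid is the decoded linear range
theorem pvGrid_linear_nat (w : Int) (hw : 0 < w) : ∀ (n : ℕ),
    pvGrid (n : Int) w = (PySem.List.pyRange 0 ((n : Int) * w) 1).map (pvCell w) := by
  intro n
  induction n with
  | zero => simp [pvGrid, PySem.List.pyRange_one_eq_nil]
  | succ n ih =>
    have hrow : PySem.List.pyRange 0 ((n : Int) + 1) 1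
        = PySem.List.pyRange 0 (n : Int) 1 ++ [(n : Int)] :=
      PySem.List.pyRange_one_succ_right (by positivity)
    have hsplit : PySem.List.pyRange 0 (((n : Int) + 1) * w) 1
        = PySem.List.pyRange 0 ((n : Int) * w) 1
          ++ PySem.List.pyRange ((n : Int) * w) (((n : Int) + 1) * w) 1 :=
      PySem.List.pyRange_one_append 0 ((n : Int) * w) (((n : Int) + 1) * w)
        (by positivity) (by nlinarith)
    have hlast : (PySem.List.pyRange 0 w 1).map (fun c => [(n : Int), c])
        = (PySem.List.pyRange ((n : Int) * w) (((n : Int) + 1) * w) 1).map (pvCell w) := by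
      rw [PySem.List.pyRange_one 0 w, PySem.List.pyRange_one ((n : Int) * w) (((n : Int) + 1) * w)]
      have harg : (((n : Int) + 1) * w - (n : Int) * w).toNat = w.toNat := by
        congr 1; ring
      have harg0 : (w - 0).toNat = w.toNat := by congr 1; ring
      rw [harg, harg0, List.map_map, List.map_map]
      apply List.map_congr_left
      intro k hk
      have hkw : (k : Int) < w := by
        have := List.mem_range.mp hk
        omega
      have := pvFdm w (n : Int) (k : Int) hw (by positivity) hkw
      simp only [Function.comp_apply, pvCell, zero_add]
      rw [this.1, this.2]
    unfold pvGrid at *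
    push_cast
    rw [hrow, List.flatMap_append, hsplit, List.map_append, ih]
    congr 1
    simpa using hlast

theorem pvGrid_linear (h w : Int) (hw : 0 < w) (hh : 0 ≤ h) :
    pvGrid h w = (PySem.List.pyRange 0 (h * w) 1).map (pvCell w) := by
  obtain ⟨n, rfl⟩ := Int.eq_ofNat_of_zero_le hh
  exact pvGrid_linear_nat w hw n

-- every blocked index is in range
theorem pvBlk_bounds (h w : Int) (snake : List (List Int)) (b : Int)
    (hb : b ∈ pvBlk h w snake) : 0 ≤ b ∧ b < h * w := by
  unfold pvBlk at hb
  obtain ⟨cell, _, hcell⟩ := List.mem_filterMap.mp hb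
  match cell with
  | [] => simp at hcell
  | [_] => simp at hcell
  | (r :: c :: _ :: _) => simp at hcell
  | [r, c] =>
    simp only at hcell
    split_ifs at hcell with hcond
    · obtain ⟨h0, h1, h2, h3⟩ := hcond
      obtain rfl : r * w + c = b := by injection hcell
      constructor
      · nlinarith
      · nlinarith

-- a grid index is blocked iff its decoded cell is in the snake
theorem pvBlk_mem (h w : Int) (snake : List (List Int)) (hw : 0 < w) (i : Int)
    (hi0 : 0 ≤ i) (hi1 : i < h * w) :
    (pvCell w i ∈ snake) ↔ i ∈ pvBlk h w snake := by
  have hwne : w ≠ 0 := ne_of_gt hw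
  have hmod0 : 0 ≤ PySem.Int.mod i w := by
    rw [PySem.Int.mod_eq_emod_of_pos hw]; exact Int.emod_nonneg i hwne
  have hmod1 : PySem.Int.mod i w < w := by
    rw [PySem.Int.mod_eq_emod_of_pos hw]; exact Int.emod_lt_of_pos i hw
  have hdiv0 : 0 ≤ PySem.Int.floordiv i w := by
    rw [PySem.Int.floordiv_eq_ediv_of_pos hw]; exact Int.ediv_nonneg hi0 (le_of_lt hw)
  have hdiv1 : PySem.Int.floordiv i w < h :=
    (PySem.Int.floordiv_lt_iff_lt_mul hw).mpr hi1
  have hrec : PySem.Int.floordiv i w * w + PySem.Int.mod i w = i :=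
    PySem.Int.floordiv_mul_add_mod i w
  constructor
  · intro hmem
    unfold pvBlk
    refine List.mem_filterMap.mpr ⟨pvCell w i, hmem, ?_⟩
    simp only [pvCell]
    rw [if_pos ⟨hdiv0, hdiv1, hmod0, hmod1⟩, hrec]
  · intro hb
    unfold pvBlk at hb
    obtain ⟨cell, hcellmem, hcell⟩ := List.mem_filterMap.mp hb
    match cell with
    | [] => simp at hcell
    | [_] => simp at hcell
    | (r :: c :: _ :: _) => simp at hcell
    | [r, c] =>
      simp only at hcell
      split_ifs at hcell with hcond
      · obtain ⟨h0, h1, h2, h3⟩ := hcond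
        obtain rfl : r * w + c = i := by injection hcell
        have := pvFdm w r c hw h2 h3
        simpa [pvCell, this.1, this.2] using hcellmem

-- B's gap-emitting loop equals decoding the non-blocked part of the linear range
theorem pvGapEmit (w total : Int) : ∀ (bs : List Int) (prev : Int) (acc : List (List Int)),
    bs.Pairwise (· < ·) → (∀ b ∈ bs, prev ≤ b ∧ b < total) →
    ((bs.foldl (fun st b => (b + 1, st.2 ++ (PySem.List.pyRange st.1 b 1).map (pvCell w)))
        (prev, acc)).2
      ++ (PySem.List.pyRange
            (bs.foldl (fun st b => (b + 1, st.2 ++ (PySem.List.pyRange st.1 b 1).map (pvCell w)))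
              (prev, acc)).1 total 1).map (pvCell w))
      = acc ++ ((PySem.List.pyRange prev total 1).filter (fun i => !decide (i ∈ bs))).map (pvCell w) := by
  intro bs
  induction bs with
  | nil => intro prev acc _ _; simp
  | cons b bs ih =>
    intro prev acc hp hbd
    have hpb : prev ≤ b := (hbd b List.mem_cons_self).1
    have hbt : b < total := (hbd b List.mem_cons_self).2
    have hblt : ∀ x ∈ bs, b < x := fun x hx => (List.pairwise_cons.mp hp).1 x hx
    rw [List.foldl_cons]
    have := ih (b + 1) (acc ++ (PySem.List.pyRange prev b 1).map (pvCell w))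
      (List.pairwise_cons.mp hp).2
      (fun x hx => ⟨by have := hblt x hx; omega, (hbd x (List.mem_cons_of_mem b hx)).2⟩)
    rw [this, List.append_assoc]
    congr 1
    rw [← List.map_append]
    congr 1
    rw [PySem.List.pyRange_one_append prev b total hpb (le_of_lt hbt),
      List.filter_append, PySem.List.pyRange_one_cons hbt]
    have h1 : (PySem.List.pyRange prev b 1).filter (fun i => !decide (i ∈ b :: bs))
        = PySem.List.pyRange prev b 1 := by
      apply List.filter_eq_self.mpr
      intro x hx
      have hxb : x < b := (PySem.List.mem_pyRange_one.mp hx).2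
      have hnm : ¬ (x ∈ b :: bs) := by
        simp only [List.mem_cons, not_or]
        exact ⟨by omega, fun hxbs => absurd (hblt x hxbs) (by omega)⟩
      simp [hnm]
    have h2 : ((b :: PySem.List.pyRange (b + 1) total 1).filter (fun i => !decide (i ∈ b :: bs)))
        = (PySem.List.pyRange (b + 1) total 1).filter (fun i => !decide (i ∈ bs)) := by
      rw [List.filter_cons, if_neg (by simp)]
      apply List.filter_congr
      intro x hx
      have : b + 1 ≤ x := (PySem.List.mem_pyRange_one.mp hx).1
      simp only [List.mem_cons]
      have hne : ¬ x = b := by omega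
      simp [hne]
    rw [h1, h2]

-- ===== VERDICT (by name: the statement is the Claim_ definition above) =====
theorem procces_map_spec : Claim_equal_procces_map := by
  intro board_size snake _ hpre
  unfold Spec_procces_map procces_map procces_map_alt
  dsimp only
  set h : Int := (PySem.List.pyGet? board_size 0).getD 0 with hh
  by_cases hhpos : 0 < h
  case neg =>
    -- h ≤ 0: grid empty on A's side; w = 0, total = 0, no blocked index on B's side
    rw [if_neg hhpos, if_neg (by omega)]
    have hblk : pvBlk h 0 snake = [] := by
      apply List.filterMap_eq_nil_iff.mpr
      intro cell _
      match cell with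
      | [] => rfl
      | [_] => rfl
      | (r :: c :: _ :: _) => rfl
      | [r, c] => simp only; rw [if_neg (by omega)]
    have hgrid0 : (PySem.List.pyRange 0 h 1).foldl (fun m row =>
        (PySem.List.pyRange 0 ((PySem.List.pyGet? board_size 1).getD 0) 1).foldl
          (fun m column => m ++ [[row, column]]) m) ([] : List (List Int)) = [] := by
      rw [PySem.List.pyRange_one_eq_nil (show h ≤ (0:Int) by omega)]; rfl
    rw [hgrid0, pvFoldlRemove_eq_filter snake [] List.nodup_nil]
    show ([] : List (List Int)) ++ _ = _
    rw [show snake.filterMap _ = pvBlk h 0 snake from rfl, hblk]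
    simp [show PySem.List.sorted ([] : List Int) (fun i => i) = [] from rfl,
      PySem.List.pyRange_one_eq_nil (le_refl (0 : Int))]
  case pos =>
    rw [if_pos hhpos]
    set w : Int := (PySem.List.pyGet? board_size 1).getD 0 with hw
    have hmap0 : (PySem.List.pyRange 0 h 1).foldl (fun m row =>
        (PySem.List.pyRange 0 w 1).foldl (fun m column => m ++ [[row, column]]) m) []
        = pvGrid h w := by
      have h1 : ∀ (m : List (List Int)) (row : Int),
          (PySem.List.pyRange 0 w 1).foldl (fun m column => m ++ [[row, column]]) m
            = m ++ (PySem.List.pyRange 0 w 1).map (fun column => [row, column]) :=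
        fun m row => PySem.List.foldl_append_singleton_eq_map _ _ _
      simp only [h1]
      rw [PySem.List.foldl_append_eq_flatMap]
      simp [pvGrid]
    rw [hmap0, pvFoldlRemove_eq_filter snake (pvGrid h w) (pvGrid_nodup h w),
      show snake.filterMap _ = pvBlk h w snake from rfl]
    by_cases hwpos : 0 < w
    case neg =>
      -- w ≤ 0: grid still empty, total = 0, no blocked index
      have hblk : pvBlk h w snake = [] := by
        apply List.filterMap_eq_nil_iff.mpr
        intro cell _
        match cell with
        | [] => rfl
        | [_] => rfl
        | (r :: c :: _ :: _) => rfl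
        | [r, c] => simp only; rw [if_neg (by omega)]
      have hgridnil : pvGrid h w = [] := by
        simp [pvGrid, PySem.List.pyRange_one_eq_nil (show w ≤ 0 by omega)]
      rw [if_neg (by omega), hblk, hgridnil]
      simp [show PySem.List.sorted ([] : List Int) (fun i => i) = [] from rfl,
        PySem.List.pyRange_one_eq_nil (le_refl (0 : Int))]
    case pos =>
      rw [if_pos ⟨hhpos, hwpos⟩]
      -- B's sorted blocked list: strictly increasing, same membership as pvBlk
      set bs : List Int :=
        PySem.List.sorted (PySem.Set.ofList (pvBlk h w snake)) (fun i => i) with hbs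
      have hbsp : bs.Pairwise (· < ·) := PySem.List.sorted_ofList_pairwise_lt _
      have hbsmem : ∀ x, x ∈ bs ↔ x ∈ pvBlk h w snake := by
        intro x
        rw [hbs, PySem.List.mem_sorted, PySem.Set.mem_ofList]
      have hbd : ∀ b ∈ bs, (0 : Int) ≤ b ∧ b < h * w := fun b hb =>
        pvBlk_bounds h w snake b ((hbsmem b).mp hb)
      simp only [show (fun i => [PySem.Int.floordiv i w, PySem.Int.mod i w]) = pvCell w from rfl]
      rw [pvGapEmit w (h * w) bs 0 [] hbsp hbd, List.nil_append]
      congr 1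
      -- A's filtered grid = decoded filtered linear range
      rw [pvGrid_linear h w hwpos (by omega), List.filter_map]
      congr 1
      apply List.filter_congr
      intro i hi
      obtain ⟨hi0, hi1⟩ := PySem.List.mem_pyRange_one.mp hi
      have hiff : (pvCell w i ∈ snake) ↔ i ∈ bs :=
        (pvBlk_mem h w snake hwpos i hi0 hi1).trans (hbsmem i).symm
      simp [hiff]
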